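-- pv_equiv track=rewrite | github.com/stojdev/oauth-client | python-tui/oauth_tui/services/cli_bridge.py | parse_providers_output
-- ===== SOURCE A (Python) =====
-- from typing import Any
--
-- def parse_providers_output(output: str) -> list[dict[str, Any]]:
--     """Parse providers from human-readable CLI output."""
--     providers = []
--
--     lines = output.split("\n")
--     current_provider = None
--
--     for line in lines:
--         line = line.strip()
--
--         # Skip empty lines and headers
--         if not line or "Configured providers:" in line or "Available presets:" in line:
--             continue
--
--         # Check if this is a provider name line (has parentheses)
--         if "(" in line and ")" in line:
--             # Extract provider name and ID
--             parts = line.split("(")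
--             if len(parts) >= 2:
--                 name = parts[0].strip()
--                 provider_id = parts[1].replace(")", "").strip()
--
--                 current_provider = {
--                     "name": provider_id,
--                     "display_name": name,
--                     "type": "generic",
--                     "client_id": None,
--                     "token_url": None,
--                     "auth_url": None,
--                 }
--                 providers.append(current_provider)
--
--         # Parse provider details
--         elif current_provider and ": " in line:
--             key, value = line.split(": ", 1)
--             key = key.strip().lower().replace(" ", "_")
--
--             if key == "client_id":
--                 current_provider["client_id"] = value
--             elif key == "token_url":
--                 current_provider["token_url"] = value
--             elif key == "authorization_url":
--                 current_provider["auth_url"] = value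
--
--     return providers
-- ===== SOURCE B (Python) =====
-- def _is_skip(line):
--     return not line or "Configured providers:" in line or "Available presets:" in line
--
--
-- def _is_boundary(raw):
--     line = raw.strip()
--     return not _is_skip(line) and "(" in line and ")" in line
--
--
-- def _build_provider(header, details):
--     parts = header.split("(")
--     client_id = token_url = auth_url = None
--     for line in details:
--         if ": " in line:
--             key, value = line.split(": ", 1)
--             key = key.strip().lower().replace(" ", "_")
--             if key == "client_id":
--                 client_id = value
--             elif key == "token_url":
--                 token_url = value
--             elif key == "authorization_url":
--                 auth_url = value
--     return {
--         "name": parts[1].replace(")", "").strip(),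
--         "display_name": parts[0].strip(),
--         "type": "generic",
--         "client_id": client_id,
--         "token_url": token_url,
--         "auth_url": auth_url,
--     }
--
--
-- def parse_providers_output(output):
--     """Parse providers from human-readable CLI output (segmentation: cut the
--     line list at provider-name lines, then build one dict per segment)."""
--     lines = output.split("\n")
--     providers = []
--     i = 0
--     while i < len(lines):
--         if not _is_boundary(lines[i]):
--             i += 1
--             continue
--         j = i + 1
--         while j < len(lines) and not _is_boundary(lines[j]):
--             j += 1
--         details = [l for l in (raw.strip() for raw in lines[i + 1:j]) if not _is_skip(l)]
--         providers.append(_build_provider(lines[i].strip(), details))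
--         i = j
--     return providers
-- ===== Notes on version B (the rewrite author's own statement) =====
-- stated objective: alternative
-- what changed: Replaced A's single-pass state machine that mutates an aliased current_provider dict with a two-level segmentation: the line list is cut into segments at provider-name lines (skipping everything before the first one) and each segment is independently turned into a provider dict whose three optional fields are accumulated in plain variables.
import Mathlib
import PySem

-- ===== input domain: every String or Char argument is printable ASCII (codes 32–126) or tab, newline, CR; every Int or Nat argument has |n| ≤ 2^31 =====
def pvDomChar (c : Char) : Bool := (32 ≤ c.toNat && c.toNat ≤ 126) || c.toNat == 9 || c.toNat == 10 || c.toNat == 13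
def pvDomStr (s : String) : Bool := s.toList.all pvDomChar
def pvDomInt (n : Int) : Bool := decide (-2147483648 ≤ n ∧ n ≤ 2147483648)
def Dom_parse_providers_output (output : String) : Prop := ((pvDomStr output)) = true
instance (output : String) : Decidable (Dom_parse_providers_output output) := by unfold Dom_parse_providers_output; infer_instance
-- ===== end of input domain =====

-- B restructures A (one state machine mutating the last appended dict) into a two-level
-- segmentation of the line list; same return value, no speed claim (objective: alternative).

-- ===== PORT A =====
-- A mutates `current_provider`, which is always the last dict appended to `providers`
-- (it is truthy iff it is set, and it is set iff `providers` is nonempty); the in-place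
-- update through the alias is modelled by modifying the LAST element of the list.
def pvModifyLast {α : Type} (f : α → α) : List α → List α
  | [] => []
  | [d] => [f d]
  | d :: rest => d :: pvModifyLast f rest

-- the body of A's `elif current_provider and ": " in line` branch (line already stripped)
def pvAUpdate (d : PySem.Dict String (Option String)) (line : String) : PySem.Dict String (Option String) :=
  match PySem.Str.splitMax? line ": " 1 with
  | some (key0 :: value :: _) =>
    let key := PySem.Str.replace (PySem.Str.lower (PySem.Str.strip key0)) " " "_"
    if key == "client_id" then d.insert "client_id" (some value)
    else if key == "token_url" then d.insert "token_url" (some value)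
    else if key == "authorization_url" then d.insert "auth_url" (some value)
    else d
  | _ => d

def pvAStep (providers : List (PySem.Dict String (Option String))) (rawLine : String) :
    List (PySem.Dict String (Option String)) :=
  let line := PySem.Str.strip rawLine
  if line == "" || PySem.Str.isIn "Configured providers:" line || PySem.Str.isIn "Available presets:" line then
    providers
  else if PySem.Str.isIn "(" line && PySem.Str.isIn ")" line then
    let parts := (PySem.Str.split? line "(").getD []
    if 2 ≤ parts.length then
      let name := PySem.Str.strip (parts.getD 0 "")
      let provider_id := PySem.Str.strip (PySem.Str.replace (parts.getD 1 "") ")" "")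
      providers ++ [PySem.Dict.ofList
        [("name", some provider_id), ("display_name", some name), ("type", some "generic"),
         ("client_id", none), ("token_url", none), ("auth_url", none)]]
    else providers
  else if !providers.isEmpty && PySem.Str.isIn ": " line then
    pvModifyLast (fun d => pvAUpdate d line) providers
  else providers

def parse_providers_output (output : String) : List (List (String × Option String)) :=
  ((((PySem.Str.split? output "\n").getD []).foldl pvAStep []).map PySem.Dict.items)

-- ===== PORT B =====
def pvIsSkip (line : String) : Bool :=
  line == "" || PySem.Str.isIn "Configured providers:" line || PySem.Str.isIn "Available presets:" line

def pvIsBoundary (raw : String) : Bool :=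
  let line := PySem.Str.strip raw
  !pvIsSkip line && (PySem.Str.isIn "(" line && PySem.Str.isIn ")" line)

def pvDetailStep (st : Option String × Option String × Option String) (line : String) :
    Option String × Option String × Option String :=
  if PySem.Str.isIn ": " line then
    match PySem.Str.splitMax? line ": " 1 with
    | some (key0 :: value :: _) =>
      let key := PySem.Str.replace (PySem.Str.lower (PySem.Str.strip key0)) " " "_"
      if key == "client_id" then (some value, st.2.1, st.2.2)
      else if key == "token_url" then (st.1, some value, st.2.2)
      else if key == "authorization_url" then (st.1, st.2.1, some value)
      else st
    | _ => st
  else st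

def pvBuildProvider (header : String) (details : List String) : List (String × Option String) :=
  let parts := (PySem.Str.split? header "(").getD []
  let cta := details.foldl pvDetailStep (none, none, none)
  [("name", some (PySem.Str.strip (PySem.Str.replace (parts.getD 1 "") ")" ""))),
   ("display_name", some (PySem.Str.strip (parts.getD 0 ""))),
   ("type", some "generic"),
   ("client_id", cta.1), ("token_url", cta.2.1), ("auth_url", cta.2.2)]

def pvSegWalk : List String → List (List (String × Option String))
  | [] => []
  | raw :: rest =>
    if pvIsBoundary raw then
      pvBuildProvider (PySem.Str.strip raw)
          (((rest.takeWhile (fun r => !pvIsBoundary r)).map PySem.Str.strip).filter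
            (fun l => !pvIsSkip l))
        :: pvSegWalk (rest.dropWhile (fun r => !pvIsBoundary r))
    else pvSegWalk rest
termination_by l => l.length
decreasing_by
  · simpa using Nat.lt_succ_of_le (List.length_dropWhile_le _ _)
  · simp

def parse_providers_output_alt (output : String) : List (List (String × Option String)) :=
  pvSegWalk ((PySem.Str.split? output "\n").getD [])

-- ===== PRECONDITION & SPEC =====
def Spec_parse_providers_output (output : String) (out : List (List (String × Option String))) : Prop := out = parse_providers_output_alt output
instance (output : String) (out : List (List (String × Option String))) : Decidable (Spec_parse_providers_output output out) := by unfold Spec_parse_providers_output; infer_instance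

-- ===== CLAIM (what is proved, stated in full; the proofs are below) =====
def Claim_equal_parse_providers_output : Prop := ∀ (output : String), Dom_parse_providers_output output → Spec_parse_providers_output output (parse_providers_output output)

-- ===== LEMMAS AND PROOFS =====

-- the dict shape A's current provider always has
def pvShape (pid name : String) (cta : Option String × Option String × Option String) :
    PySem.Dict String (Option String) :=
  PySem.Dict.ofList
    [("name", some pid), ("display_name", some name), ("type", some "generic"),
     ("client_id", cta.1), ("token_url", cta.2.1), ("auth_url", cta.2.2)]

theorem pvModifyLast_append {α : Type} (f : α → α) (xs : List α) (x : α) :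
    pvModifyLast f (xs ++ [x]) = xs ++ [f x] := by
  induction xs with
  | nil => rfl
  | cons a t ih =>
    cases t with
    | nil => simp [pvModifyLast] at ih ⊢
    | cons b u => simpa [pvModifyLast] using ih

theorem pvSplitOnGo_len (sep : List Char) (fuel : Nat) :
    ∀ (l cur : List Char) (acc : List (List Char)),
      acc.length + 1 ≤ (PySem.Chars.splitOn.go sep fuel l cur acc).length := by
  induction fuel with
  | zero => intro l cur acc; simp [PySem.Chars.splitOn.go]
  | succ fuel ih =>
    intro l cur acc
    cases l with
    | nil => simp [PySem.Chars.splitOn.go]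
    | cons c rest =>
      rw [PySem.Chars.splitOn.go]
      by_cases h : sep.isPrefixOf (c :: rest) = true
      · simp only [h, if_true]
        have := ih (List.drop sep.length (c :: rest)) [] ((cur.reverse) :: acc)
        simp at this ⊢; omega
      · simp only [h]
        simpa using ih rest (c :: cur) acc

theorem pvSplitOnGo_len2 (sep : List Char) (hsep : sep ≠ []) (fuel : Nat) :
    ∀ (l cur : List Char) (acc : List (List Char)), l.length < fuel → sep <:+: l →
      acc.length + 2 ≤ (PySem.Chars.splitOn.go sep fuel l cur acc).length := by
  induction fuel with
  | zero => intro l cur acc h; omega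
  | succ fuel ih =>
    intro l cur acc hlen hinf
    cases l with
    | nil => simp [List.infix_nil] at hinf; exact absurd hinf hsep
    | cons c rest =>
      rw [PySem.Chars.splitOn.go]
      by_cases h : sep.isPrefixOf (c :: rest) = true
      · simp only [h, if_true]
        have := pvSplitOnGo_len sep fuel (List.drop sep.length (c :: rest)) [] (cur.reverse :: acc)
        simp at this ⊢; omega
      · simp only [h]
        have hrest : sep <:+: rest := by
          rcases (List.infix_cons_iff).1 hinf with hp | hi
          · exact absurd (List.isPrefixOf_iff_prefix.2 hp) h
          · exact hi
        have := ih rest (c :: cur) acc (by simp at hlen; omega) hrest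
        simpa using this
  
theorem pvParts_len {line : String} (h : PySem.Str.isIn "(" line = true) :
    2 ≤ ((PySem.Str.split? line "(").getD []).length := by
  have hinf : ('(' :: []) <:+: line.toList := by
    simpa using (PySem.Str.isIn_iff_infix _ _).1 h
  have := pvSplitOnGo_len2 ['('] (by simp) (line.toList.length + 1) line.toList [] []
    (by omega) hinf
  simp [PySem.Str.split?, PySem.Chars.split?, PySem.Chars.splitOn]
  simpa using this

-- A's detail update preserves the shape and acts exactly like B's triple step
theorem pvShape_update (pid name : String) (cta : Option String × Option String × Option String)
    (line : String) (h : PySem.Str.isIn ": " line = true) :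
    pvAUpdate (pvShape pid name cta) line = pvShape pid name (pvDetailStep cta line) := by
  obtain ⟨c, t, a⟩ := cta
  unfold pvAUpdate pvDetailStep
  rw [if_pos h]
  cases hs : PySem.Str.splitMax? line ": " 1 with
  | none => rfl
  | some parts =>
    cases parts with
    | nil => rfl
    | cons k rest =>
      cases rest with
      | nil => rfl
      | cons v u =>
        by_cases h1 : PySem.Str.replace (PySem.Str.lower (PySem.Str.strip k)) " " "_" == "client_id"
        · simp only [h1]; simp; rfl
        · by_cases h2 : PySem.Str.replace (PySem.Str.lower (PySem.Str.strip k)) " " "_" == "token_url"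
          · simp only [h1, h2]; simp; rfl
          · by_cases h3 : PySem.Str.replace (PySem.Str.lower (PySem.Str.strip k)) " " "_" == "authorization_url"
            · simp only [h1, h2, h3]; simp; rfl
            · simp only [h1, h2, h3]; simp

-- A's detail branch applied with its ": " guard
def pvADetail (d : PySem.Dict String (Option String)) (line : String) :
    PySem.Dict String (Option String) :=
  if PySem.Str.isIn ": " line then pvAUpdate d line else d

theorem pvShape_detail (pid name : String) (cta : Option String × Option String × Option String)
    (line : String) :
    pvADetail (pvShape pid name cta) line = pvShape pid name (pvDetailStep cta line) := by
  unfold pvADetail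
  by_cases h : PySem.Str.isIn ": " line = true
  · rw [if_pos h]; exact pvShape_update pid name cta line h
  · rw [if_neg h, pvDetailStep, if_neg h]

theorem pvShape_foldl (pid name : String) (cta : Option String × Option String × Option String)
    (details : List String) :
    details.foldl pvADetail (pvShape pid name cta) =
      pvShape pid name (details.foldl pvDetailStep cta) := by
  induction details generalizing cta with
  | nil => rfl
  | cons l t ih => simp only [List.foldl_cons, pvShape_detail, ih]

theorem pvShape_build (header : String) (details : List String) :
    (details.foldl pvADetail
      (pvShape (PySem.Str.strip (PySem.Str.replace ((((PySem.Str.split? header "(").getD []).getD 1 "")) ")" ""))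
               (PySem.Str.strip (((PySem.Str.split? header "(").getD []).getD 0 ""))
               (none, none, none))).items = pvBuildProvider header details := by
  rw [pvShape_foldl]
  rfl

-- main invariant: folding A's step from a state `init ++ [d]` (d = aliased current provider)
theorem pvMain (lines : List String) :
    ∀ (init : List (PySem.Dict String (Option String))) (d : PySem.Dict String (Option String)),
      ((lines.foldl pvAStep (init ++ [d])).map PySem.Dict.items) =
        init.map PySem.Dict.items ++
          ((((lines.takeWhile (fun r => !pvIsBoundary r)).map PySem.Str.strip).filter
              (fun l => !pvIsSkip l)).foldl pvADetail d).items
            :: pvSegWalk (lines.dropWhile (fun r => !pvIsBoundary r)) := by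
  induction lines with
  | nil => intro init d; simp [pvSegWalk]
  | cons raw rest ih =>
    intro init d
    by_cases hskip : pvIsSkip (PySem.Str.strip raw) = true
    · have hb : pvIsBoundary raw = false := by simp [pvIsBoundary, hskip]
      have hstep : pvAStep (init ++ [d]) raw = init ++ [d] := by
        unfold pvAStep
        rw [if_pos (by unfold pvIsSkip at hskip; exact hskip)]
      rw [List.foldl_cons, hstep]
      simp only [List.takeWhile_cons, List.dropWhile_cons, hb, Bool.not_false, if_true,
        List.map_cons, List.filter_cons, hskip, Bool.not_true, Bool.false_eq_true, if_false]
      exact ih init d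
    · have hskip' : pvIsSkip (PySem.Str.strip raw) = false := by simpa using hskip
      by_cases hpar : (PySem.Str.isIn "(" (PySem.Str.strip raw) &&
          PySem.Str.isIn ")" (PySem.Str.strip raw)) = true
      · -- boundary line: a new provider starts
        have hb : pvIsBoundary raw = true := by
          simp only [pvIsBoundary]; rw [hskip', hpar]; rfl
        have hlen : 2 ≤ ((PySem.Str.split? (PySem.Str.strip raw) "(").getD []).length :=
          pvParts_len (Bool.and_eq_true_iff.1 hpar).1
        have hstep : pvAStep (init ++ [d]) raw = (init ++ [d]) ++
            [pvShape
              (PySem.Str.strip (PySem.Str.replace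
                ((((PySem.Str.split? (PySem.Str.strip raw) "(").getD []).getD 1 "")) ")" ""))
              (PySem.Str.strip (((PySem.Str.split? (PySem.Str.strip raw) "(").getD []).getD 0 ""))
              (none, none, none)] := by
          unfold pvAStep
          rw [if_neg (by unfold pvIsSkip at hskip; exact hskip), if_pos hpar, if_pos hlen]
          rfl
        rw [List.foldl_cons, hstep]
        rw [ih (init ++ [d]) _]
        simp only [List.takeWhile_cons, List.dropWhile_cons, hb, Bool.not_true,
          Bool.false_eq_true, if_false]
        rw [pvShape_build]
        rw [pvSegWalk]
        simp [hb]
      · -- detail (or irrelevant) line inside the current segment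
        have hpar' : (PySem.Str.isIn "(" (PySem.Str.strip raw) &&
            PySem.Str.isIn ")" (PySem.Str.strip raw)) = false := by simpa using hpar
        have hb : pvIsBoundary raw = false := by
          simp only [pvIsBoundary]; rw [hpar']; simp
        have hne : (init ++ [d]).isEmpty = false := by simp
        have hstep : pvAStep (init ++ [d]) raw = init ++ [pvADetail d (PySem.Str.strip raw)] := by
          unfold pvAStep
          rw [if_neg (by unfold pvIsSkip at hskip; exact hskip), if_neg hpar]
          by_cases hcol : PySem.Str.isIn ": " (PySem.Str.strip raw) = true
          · rw [if_pos (by rw [hne, hcol]; rfl), pvModifyLast_append]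
            unfold pvADetail; rw [if_pos hcol]
          · rw [if_neg (by rw [hne]; simp only [Bool.not_false, Bool.true_and]; exact hcol)]
            unfold pvADetail; rw [if_neg hcol]
        rw [List.foldl_cons, hstep]
        simp only [List.takeWhile_cons, List.dropWhile_cons, hb, Bool.not_false, if_true,
          List.map_cons, List.filter_cons, hskip', Bool.not_false, if_true, List.foldl_cons]
        exact ih init (pvADetail d (PySem.Str.strip raw))

theorem pvMainNil (lines : List String) :
    ((lines.foldl pvAStep []).map PySem.Dict.items) = pvSegWalk lines := by
  induction lines with
  | nil => rw [pvSegWalk]; rfl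
  | cons raw rest ih =>
    by_cases hbb : pvIsBoundary raw = true
    · have hb2 := hbb
      simp only [pvIsBoundary, Bool.and_eq_true, Bool.not_eq_true'] at hb2
      obtain ⟨hskip', hp1, hp2⟩ := hb2
      have hskip : ¬ pvIsSkip (PySem.Str.strip raw) = true := by simp [hskip']
      have hpar : (PySem.Str.isIn "(" (PySem.Str.strip raw) &&
          PySem.Str.isIn ")" (PySem.Str.strip raw)) = true := by rw [hp1, hp2]; rfl
      have hlen : 2 ≤ ((PySem.Str.split? (PySem.Str.strip raw) "(").getD []).length :=
        pvParts_len hp1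
      have hstep : pvAStep [] raw = [] ++
          [pvShape
            (PySem.Str.strip (PySem.Str.replace
              ((((PySem.Str.split? (PySem.Str.strip raw) "(").getD []).getD 1 "")) ")" ""))
            (PySem.Str.strip (((PySem.Str.split? (PySem.Str.strip raw) "(").getD []).getD 0 ""))
            (none, none, none)] := by
        unfold pvAStep
        rw [if_neg (by unfold pvIsSkip at hskip; exact hskip), if_pos hpar, if_pos hlen]
        rfl
      rw [List.foldl_cons, hstep, pvMain rest _ _, pvShape_build, pvSegWalk]
      simp [hbb]
    · have hb' : pvIsBoundary raw = false := by simpa using hbb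
      have hstep : pvAStep [] raw = [] := by
        unfold pvAStep
        by_cases hskip : pvIsSkip (PySem.Str.strip raw) = true
        · rw [if_pos (by unfold pvIsSkip at hskip; exact hskip)]
        · have hskip' : pvIsSkip (PySem.Str.strip raw) = false := by simpa using hskip
          have hb2 := hb'
          simp only [pvIsBoundary] at hb2
          rw [hskip'] at hb2
          simp only [Bool.not_false, Bool.true_and] at hb2
          rw [if_neg (by unfold pvIsSkip at hskip; exact hskip), if_neg (by rw [hb2]; simp)]
          rw [if_neg (by simp)]
      rw [List.foldl_cons, hstep, ih, pvSegWalk]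
      simp [hb']

-- ===== VERDICT (by name: the statement is the Claim_ definition above) =====
theorem parse_providers_output_spec : Claim_equal_parse_providers_output := by
  intro output _
  unfold Spec_parse_providers_output parse_providers_output parse_providers_output_alt
  exact pvMainNil _
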